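-- pv_equiv track=rewrite | github.com/miliar/Code_Jam_Webscraper | solutions_python/Problem_178/4210.py | take_first_blanks
-- ===== SOURCE A (Python) =====
-- def take_first_blanks(str):
--     result = ''
--     sequence = 0
--     for s in str:
--         if s == '-':
--             sequence += 1
--         if s == '+' and sequence > 0:
--             return result
--         result += s
--     return result
-- ===== SOURCE B (Python) =====
-- def take_first_blanks(str):
--     d = str.find('-')
--     if d == -1:
--         return str
--     p = str.find('+', d + 1)
--     if p == -1:
--         return str
--     return str[:p]
-- ===== Notes on version B (the rewrite author's own statement) =====
-- stated objective: simpler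
-- what changed: Replaced the char-by-char accumulation loop with a dash-counter by two built-in searches (find first '-', then first '+' after it) and a single slice; C-speed str.find/slicing replaces per-character Python work.
import Mathlib
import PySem

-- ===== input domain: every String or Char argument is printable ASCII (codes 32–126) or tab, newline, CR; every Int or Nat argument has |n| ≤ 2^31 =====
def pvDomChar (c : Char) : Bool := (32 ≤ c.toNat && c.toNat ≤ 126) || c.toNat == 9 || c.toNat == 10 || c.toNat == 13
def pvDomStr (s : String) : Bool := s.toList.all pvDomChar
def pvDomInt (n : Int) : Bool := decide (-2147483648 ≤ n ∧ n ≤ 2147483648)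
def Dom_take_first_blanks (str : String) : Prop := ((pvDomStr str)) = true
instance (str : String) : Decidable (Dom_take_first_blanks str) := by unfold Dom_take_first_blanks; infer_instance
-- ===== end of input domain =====

-- ===== PORT A =====
-- B replaces A's char-by-char accumulation with find/find-from/slice (objective: simpler).
-- loop of A: accumulate result, count '-'; early-return result at a '+' once a '-' was seen
def takeFirstBlanksGo : List Char → List Char → Int → List Char
  | [], result, _ => result
  | s :: rest, result, sequence =>
    let sequence' := if s = '-' then sequence + 1 else sequence
    if s = '+' ∧ sequence' > 0 then result
    else takeFirstBlanksGo rest (result ++ [s]) sequence'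

def take_first_blanks (str : String) : String :=
  String.ofList (takeFirstBlanksGo str.toList [] 0)

-- ===== PORT B =====
def take_first_blanks_alt (str : String) : String :=
  let d := PySem.Str.find str "-"
  if d = -1 then str
  else
    let p := PySem.Str.findFrom str "+" (d + 1)
    if p = -1 then str
    else PySem.Str.slice str none (some p)

-- ===== PRECONDITION & SPEC =====
def Spec_take_first_blanks (str : String) (out : String) : Prop := out = take_first_blanks_alt str
instance (str : String) (out : String) : Decidable (Spec_take_first_blanks str out) := by unfold Spec_take_first_blanks; infer_instance

-- ===== CLAIM (what is proved, stated in full; the proofs are below) =====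
def Claim_equal_take_first_blanks : Prop := ∀ (str : String), Dom_take_first_blanks str → Spec_take_first_blanks str (take_first_blanks str)

-- ===== LEMMAS AND PROOFS =====

-- accumulator-free, Bool-flag form of A's loop
def gTFB : List Char → Bool → List Char
  | [], _ => []
  | c :: r, b =>
    let b' := b || (c = '-')
    if c = '+' ∧ b' = true then [] else c :: gTFB r b'

lemma takeFirstBlanksGo_eq_g : ∀ (cs acc : List Char) (seq : Int), 0 ≤ seq →
    takeFirstBlanksGo cs acc seq = acc ++ gTFB cs (decide (0 < seq)) := by
  intro cs
  induction cs with
  | nil => intro acc seq _; simp [takeFirstBlanksGo, gTFB]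
  | cons c r ih =>
    intro acc seq hseq
    simp only [takeFirstBlanksGo, gTFB]
    by_cases hminus : c = '-'
    · subst hminus
      simp [show (0:Int) < seq + 1 from by omega,
        ih (acc ++ ['-']) (seq + 1) (by omega)]
    · by_cases hplus : c = '+'
      · subst hplus
        by_cases hpos : 0 < seq
        · simp [hminus, hpos]
        · have h0 : seq = 0 := by omega
          subst h0
          simp [hminus, ih (acc ++ ['+']) 0 le_rfl]
      · simp [hminus, hplus, ih (acc ++ [c]) seq hseq]

lemma gTFB_no_minus : ∀ (cs : List Char), '-' ∉ cs → gTFB cs false = cs := by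
  intro cs
  induction cs with
  | nil => intro _; rfl
  | cons c r ih =>
    intro h
    have hc : c ≠ '-' := fun hh => h (hh ▸ List.mem_cons_self ..)
    simp only [gTFB, hc, decide_false, Bool.or_false]
    rw [if_neg (by simp)]
    rw [ih (fun hm => h (List.mem_cons_of_mem _ hm))]

lemma gTFB_split : ∀ (xs ys : List Char), '-' ∉ xs →
    gTFB (xs ++ '-' :: ys) false = xs ++ '-' :: gTFB ys true := by
  intro xs
  induction xs with
  | nil =>
    intro ys _
    simp only [List.nil_append, gTFB]
    rw [if_neg (by decide)]
    simp
  | cons c r ih =>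
    intro ys h
    have hc : c ≠ '-' := fun hh => h (hh ▸ List.mem_cons_self ..)
    simp only [List.cons_append, gTFB, hc, decide_false, Bool.or_false]
    rw [if_neg (by simp)]
    rw [ih ys (fun hm => h (List.mem_cons_of_mem _ hm))]

lemma gTFB_true_no_plus : ∀ (ys : List Char), '+' ∉ ys → gTFB ys true = ys := by
  intro ys
  induction ys with
  | nil => intro _; rfl
  | cons c r ih =>
    intro h
    have hc : c ≠ '+' := fun hh => h (hh ▸ List.mem_cons_self ..)
    simp only [gTFB, Bool.true_or]
    rw [if_neg (by simp [hc])]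
    rw [ih (fun hm => h (List.mem_cons_of_mem _ hm))]

lemma gTFB_true_take : ∀ (ys : List Char) (m : Nat), ys[m]? = some '+' →
    (∀ i < m, ys[i]? ≠ some '+') → gTFB ys true = ys.take m := by
  intro ys
  induction ys with
  | nil => intro m hm _; simp at hm
  | cons c r ih =>
    intro m hm hlt
    cases m with
    | zero =>
      simp at hm
      simp [gTFB, hm]
    | succ m' =>
      have hc : c ≠ '+' := by
        intro hh
        exact hlt 0 (Nat.succ_pos _) (by simp [hh])
      simp only [gTFB, Bool.true_or]
      rw [if_neg (by simp [hc])]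
      simp only [List.getElem?_cons_succ] at hm
      rw [ih m' hm (fun i hi => by
        have := hlt (i + 1) (by omega)
        simpa using this)]
      simp

lemma singleton_prefix_drop {l : List Char} {i : Nat} {c : Char} :
    [c] <+: l.drop i ↔ l[i]? = some c := by
  rw [← List.head?_drop]
  cases h : (l.drop i) with
  | nil => simp [List.prefix_iff_eq_take]
  | cons a t =>
    constructor
    · intro hp
      obtain ⟨u, hu⟩ := hp
      simp at hu ⊢
      exact hu.1.symm
    · intro hh
      simp at hh
      exact ⟨t, by simp [hh]⟩

-- ===== VERDICT (by name: the statement is the Claim_ definition above) =====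
theorem take_first_blanks_spec : Claim_equal_take_first_blanks := by
  intro str _
  unfold Spec_take_first_blanks take_first_blanks take_first_blanks_alt
  rw [takeFirstBlanksGo_eq_g _ _ _ (le_refl 0)]
  simp only [show (decide ((0:Int) < 0)) = false from by decide]
  simp only [List.nil_append, PySem.Str.find_eq, PySem.Str.findFrom_eq]
  set L := str.toList with hL
  clear_value L
  have hminusList : ("-" : String).toList = ['-'] := by decide
  have hplusList : ("+" : String).toList = ['+'] := by decide
  rw [hminusList]
  by_cases hd : PySem.Chars.find L ['-'] = -1
  · -- no '-' at all: A returns the whole string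
    rw [if_pos hd]
    have hnot : ¬ (['-'] <:+: L) := (PySem.Chars.find_eq_neg_one_iff L ['-']).mp hd
    have hmem : '-' ∉ L := fun hm => hnot ((List.singleton_infix_iff _ _).mpr hm)
    rw [gTFB_no_minus L hmem]
    simp [hL]
  · rw [if_neg hd]
    have hdge : 0 ≤ PySem.Chars.find L ['-'] := by
      have := PySem.Chars.neg_one_le_find L ['-']
      omega
    obtain ⟨hpre, hmin⟩ := PySem.Chars.find_spec hdge
    set n := (PySem.Chars.find L ['-']).toNat with hn
    clear_value n
    have hgetn : L[n]? = some '-' := singleton_prefix_drop.mp hpre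
    have hnlt : n < L.length := by
      by_contra hge
      rw [List.getElem?_eq_none (by omega)] at hgetn
      exact absurd hgetn (by simp)
    have hLdec : L = L.take n ++ '-' :: L.drop (n + 1) := by
      conv_lhs => rw [← List.take_append_drop n L]
      rw [List.drop_eq_getElem_cons hnlt]
      have : L[n] = '-' := by
        have := List.getElem?_eq_getElem hnlt
        rw [this] at hgetn; exact Option.some.inj hgetn
      rw [this]
    have hxs : '-' ∉ L.take n := by
      intro hm
      obtain ⟨i, hi, hgi⟩ := List.mem_iff_getElem.mp hm
      have hilt : i < n := by
        have := List.length_take_le n L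
        omega
      apply hmin i hilt
      rw [singleton_prefix_drop]
      rw [List.getElem?_eq_getElem (by omega)]
      rw [← hgi, List.getElem_take]
    -- findFrom at n+1
    have hfindcast : PySem.Chars.find L ['-'] + 1 = ((n + 1 : Nat) : Int) := by
      push_cast; omega
    rw [hplusList, hfindcast, PySem.Chars.findFrom_natCast L ['+'] (n + 1) (by omega)]
    set ys := L.drop (n + 1) with hys
    clear_value ys
    by_cases hp : PySem.Chars.find ys ['+'] = -1
    · rw [if_pos hp, if_pos rfl]
      have hnot : ¬ (['+'] <:+: ys) := (PySem.Chars.find_eq_neg_one_iff ys ['+']).mp hp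
      have hmem : '+' ∉ ys := fun hm => hnot ((List.singleton_infix_iff _ _).mpr hm)
      conv_lhs => rw [hLdec]
      rw [gTFB_split _ _ hxs, gTFB_true_no_plus ys hmem, ← hLdec]
      simp [hL]
    · rw [if_neg hp, if_neg (by
        intro heq
        have := PySem.Chars.neg_one_le_find ys ['+']
        omega)]
      have hpge : 0 ≤ PySem.Chars.find ys ['+'] := by
        have := PySem.Chars.neg_one_le_find ys ['+']
        omega
      obtain ⟨hppre, hpmin⟩ := PySem.Chars.find_spec hpge
      set m := (PySem.Chars.find ys ['+']).toNat with hm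
      clear_value m
      have hgetm : ys[m]? = some '+' := singleton_prefix_drop.mp hppre
      have hmlt : m < ys.length := by
        by_contra hge
        rw [List.getElem?_eq_none (by omega)] at hgetm
        exact absurd hgetm (by simp)
      have hA : gTFB L false = L.take n ++ '-' :: ys.take m := by
        conv_lhs => rw [hLdec]
        rw [gTFB_split _ _ hxs]
        rw [gTFB_true_take ys m hgetm (fun i hi => by
          intro hgi
          exact hpmin i hi (singleton_prefix_drop.mpr hgi))]
      rw [hA]
      -- B side: slice to (n+1)+m
      have hcast : (((n + 1 : Nat) : Int) + PySem.Chars.find ys ['+']) = (((n + 1 + m : Nat)) : Int) := by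
        push_cast; omega
      rw [hcast]
      have hslice : (PySem.Str.slice str none (some ((n + 1 + m : Nat) : Int))).toList
          = L.take (n + 1 + m) := by
        rw [PySem.Str.toList_slice]
        rw [PySem.Chars.slice_eq_listSlice]
        rw [PySem.List.slice_to_natCast, ← hL]
      have htake : L.take (n + 1 + m) = L.take n ++ '-' :: ys.take m := by
        conv_lhs => rw [hLdec]
        rw [List.take_append]
        have hlen : (L.take n).length = n := by
          rw [List.length_take]; omega
        rw [hlen]
        have h1 : n + 1 + m - n = m + 1 := by omega
        have h2 : min (n + 1 + m) n = n := by omega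
        rw [List.take_take, h2, h1, List.take_succ_cons]
      have hB : PySem.Str.slice str none (some ((n + 1 + m : Nat) : Int))
          = String.ofList (L.take n ++ '-' :: ys.take m) := by
        rw [← htake, ← hslice, String.ofList_toList]
      exact hB.symm
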